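-- pv_equiv track=rewrite | github.com/Pastuszka/StructuralVariants | main.py | reinsert_frozen_segments
-- ===== SOURCE A (Python) =====
-- def reinsert_frozen_segments(segment_starts, frozen_segment_starts, is_frozen):
--     all_segment_starts = []
--     shift = 0
--     unfrozen_index = 0
--     frozen_index = 0
--     for i in range(len(is_frozen)):
--         if is_frozen[i]:
--             shift += 1
--             if frozen_index < len(frozen_segment_starts) and frozen_segment_starts[frozen_index] == i:
--                 all_segment_starts.append(i)
--                 frozen_index += 1
--         else:
--             if unfrozen_index < len(segment_starts) and segment_starts[unfrozen_index] + shift == i: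
--                 all_segment_starts.append(i)
--                 unfrozen_index += 1
--     return all_segment_starts
-- ===== SOURCE B (Python) =====
-- def reinsert_frozen_segments(segment_starts, frozen_segment_starts, is_frozen):
--     # Split the positions by frozen flag, run two independent greedy matches,
--     # then merge the two ascending disjoint hit lists by value.
--     frozen_positions = [i for i, f in enumerate(is_frozen) if f]
--     unfrozen_positions = [i for i, f in enumerate(is_frozen) if not f]
--     frozen_hits = []
--     fi = 0
--     for i in frozen_positions:
--         if fi < len(frozen_segment_starts) and frozen_segment_starts[fi] == i:
--             frozen_hits.append(i)
--             fi += 1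
--     unfrozen_hits = []
--     ui = 0
--     for k, i in enumerate(unfrozen_positions):
--         if ui < len(segment_starts) and segment_starts[ui] == k:
--             unfrozen_hits.append(i)
--             ui += 1
--     out = []
--     a = b = 0
--     while a < len(frozen_hits) and b < len(unfrozen_hits):
--         if frozen_hits[a] < unfrozen_hits[b]:
--             out.append(frozen_hits[a]); a += 1
--         else:
--             out.append(unfrozen_hits[b]); b += 1
--     return out + frozen_hits[a:] + unfrozen_hits[b:]
-- ===== Notes on version B (the rewrite author's own statement) =====
-- stated objective: alternative
-- what changed: Replaces A's single interleaved loop carrying a running shift with two independent greedy two-pointer matches (frozen starts against frozen positions, segment starts against compressed unfrozen coordinates) whose ascending disjoint hit lists are merged by value.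
import Mathlib
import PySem

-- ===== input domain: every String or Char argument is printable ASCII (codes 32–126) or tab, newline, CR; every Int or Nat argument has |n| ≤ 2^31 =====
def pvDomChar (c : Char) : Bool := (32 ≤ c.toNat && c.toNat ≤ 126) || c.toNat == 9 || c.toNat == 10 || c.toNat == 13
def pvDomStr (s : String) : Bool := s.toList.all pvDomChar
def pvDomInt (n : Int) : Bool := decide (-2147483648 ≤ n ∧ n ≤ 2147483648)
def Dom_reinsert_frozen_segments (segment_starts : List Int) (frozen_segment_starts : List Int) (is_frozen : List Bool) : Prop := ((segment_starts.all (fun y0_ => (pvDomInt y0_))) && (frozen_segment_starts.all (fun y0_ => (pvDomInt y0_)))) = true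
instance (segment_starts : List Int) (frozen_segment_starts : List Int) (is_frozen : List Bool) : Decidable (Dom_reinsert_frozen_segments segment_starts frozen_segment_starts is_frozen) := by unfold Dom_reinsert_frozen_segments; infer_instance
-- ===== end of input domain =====

-- B replaces A's single interleaved loop by two independent greedy matches (frozen /
-- compressed-unfrozen) over position tables, merged by value; objective: alternative
-- decomposition of the same O(n) pass.

-- ===== PORT A =====
-- A's for-loop over range(len(is_frozen)) as structural recursion on is_frozen,
-- carrying i, shift, unfrozen_index, frozen_index; appends become cons (in i-order).
def rfsLoopA (ss fss : List Int) : List Bool → Nat → Int → Nat → Nat → List Int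
  | [], _, _, _, _ => []
  | f :: rest, i, shift, ui, fi =>
    if f then
      if fi < fss.length && fss.getD fi 0 == (i : Int) then
        (i : Int) :: rfsLoopA ss fss rest (i+1) (shift+1) ui (fi+1)
      else
        rfsLoopA ss fss rest (i+1) (shift+1) ui fi
    else
      if ui < ss.length && ss.getD ui 0 + shift == (i : Int) then
        (i : Int) :: rfsLoopA ss fss rest (i+1) shift (ui+1) fi
      else
        rfsLoopA ss fss rest (i+1) shift ui fi

def reinsert_frozen_segments (segment_starts : List Int) (frozen_segment_starts : List Int) (is_frozen : List Bool) : List Int :=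
  rfsLoopA segment_starts frozen_segment_starts is_frozen 0 0 0 0

-- ===== PORT B =====
-- [i for i,f in enumerate(is_frozen) if f]
def rfsFrozenPos : List Bool → Nat → List Nat
  | [], _ => []
  | f :: rest, i => if f then i :: rfsFrozenPos rest (i+1) else rfsFrozenPos rest (i+1)

-- [i for i,f in enumerate(is_frozen) if not f]
def rfsUnfrozenPos : List Bool → Nat → List Nat
  | [], _ => []
  | f :: rest, i => if f then rfsUnfrozenPos rest (i+1) else i :: rfsUnfrozenPos rest (i+1)

-- greedy match of frozen_segment_starts against the frozen positions
def rfsGreedyF (fss : List Int) : List Nat → Nat → List Int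
  | [], _ => []
  | p :: rest, fi =>
    if fi < fss.length && fss.getD fi 0 == (p : Int) then
      (p : Int) :: rfsGreedyF fss rest (fi+1)
    else
      rfsGreedyF fss rest fi

-- greedy match of segment_starts against compressed coordinates k = 0,1,2,…
def rfsGreedyU (ss : List Int) : List Nat → Nat → Nat → List Int
  | [], _, _ => []
  | p :: rest, k, ui =>
    if ui < ss.length && ss.getD ui 0 == (k : Int) then
      (p : Int) :: rfsGreedyU ss rest (k+1) (ui+1)
    else
      rfsGreedyU ss rest (k+1) ui

-- merge of the two ascending disjoint hit lists by value (B's while loop + tails)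
def rfsMerge : List Int → List Int → List Int
  | [], ys => ys
  | x :: xs, [] => x :: xs
  | x :: xs, y :: ys => if x < y then x :: rfsMerge xs (y :: ys) else y :: rfsMerge (x :: xs) ys

def reinsert_frozen_segments_alt (segment_starts : List Int) (frozen_segment_starts : List Int) (is_frozen : List Bool) : List Int :=
  rfsMerge (rfsGreedyF frozen_segment_starts (rfsFrozenPos is_frozen 0) 0)
           (rfsGreedyU segment_starts (rfsUnfrozenPos is_frozen 0) 0 0)

-- ===== PRECONDITION & SPEC =====
def Spec_reinsert_frozen_segments (segment_starts : List Int) (frozen_segment_starts : List Int) (is_frozen : List Bool) (out : List Int) : Prop := out = reinsert_frozen_segments_alt segment_starts frozen_segment_starts is_frozen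
instance (segment_starts : List Int) (frozen_segment_starts : List Int) (is_frozen : List Bool) (out : List Int) : Decidable (Spec_reinsert_frozen_segments segment_starts frozen_segment_starts is_frozen out) := by unfold Spec_reinsert_frozen_segments; infer_instance

-- ===== CLAIM (what is proved, stated in full; the proofs are below) =====
def Claim_equal_reinsert_frozen_segments : Prop := ∀ (segment_starts : List Int) (frozen_segment_starts : List Int) (is_frozen : List Bool), Dom_reinsert_frozen_segments segment_starts frozen_segment_starts is_frozen → Spec_reinsert_frozen_segments segment_starts frozen_segment_starts is_frozen (reinsert_frozen_segments segment_starts frozen_segment_starts is_frozen)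

-- ===== LEMMAS AND PROOFS =====

lemma rfsFrozenPos_lb : ∀ (isf : List Bool) (i p : Nat), p ∈ rfsFrozenPos isf i → i ≤ p := by
  intro isf
  induction isf with
  | nil => intro i p h; simp [rfsFrozenPos] at h
  | cons f rest ih =>
    intro i p h
    simp only [rfsFrozenPos] at h
    split at h
    · rcases List.mem_cons.mp h with h | h
      · omega
      · have := ih (i+1) p h; omega
    · have := ih (i+1) p h; omega

lemma rfsUnfrozenPos_lb : ∀ (isf : List Bool) (i p : Nat), p ∈ rfsUnfrozenPos isf i → i ≤ p := by
  intro isf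
  induction isf with
  | nil => intro i p h; simp [rfsUnfrozenPos] at h
  | cons f rest ih =>
    intro i p h
    simp only [rfsUnfrozenPos] at h
    split at h
    · have := ih (i+1) p h; omega
    · rcases List.mem_cons.mp h with h | h
      · omega
      · have := ih (i+1) p h; omega

lemma rfsGreedyF_mem (fss : List Int) : ∀ (ps : List Nat) (fi : Nat) (x : Int),
    x ∈ rfsGreedyF fss ps fi → ∃ p ∈ ps, x = (p : Int) := by
  intro ps
  induction ps with
  | nil => intro fi x h; simp [rfsGreedyF] at h
  | cons p rest ih =>
    intro fi x h
    simp only [rfsGreedyF] at h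
    split at h
    · rcases List.mem_cons.mp h with h | h
      · exact ⟨p, List.mem_cons_self .., h⟩
      · obtain ⟨q, hq, hx⟩ := ih (fi+1) x h
        exact ⟨q, List.mem_cons_of_mem _ hq, hx⟩
    · obtain ⟨q, hq, hx⟩ := ih fi x h
      exact ⟨q, List.mem_cons_of_mem _ hq, hx⟩

lemma rfsGreedyU_mem (ss : List Int) : ∀ (ps : List Nat) (k ui : Nat) (x : Int),
    x ∈ rfsGreedyU ss ps k ui → ∃ p ∈ ps, x = (p : Int) := by
  intro ps
  induction ps with
  | nil => intro k ui x h; simp [rfsGreedyU] at h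
  | cons p rest ih =>
    intro k ui x h
    simp only [rfsGreedyU] at h
    split at h
    · rcases List.mem_cons.mp h with h | h
      · exact ⟨p, List.mem_cons_self .., h⟩
      · obtain ⟨q, hq, hx⟩ := ih (k+1) (ui+1) x h
        exact ⟨q, List.mem_cons_of_mem _ hq, hx⟩
    · obtain ⟨q, hq, hx⟩ := ih (k+1) ui x h
      exact ⟨q, List.mem_cons_of_mem _ hq, hx⟩

lemma rfsMerge_left (x : Int) (xs ys : List Int) (h : ∀ y ∈ ys, x < y) :
    rfsMerge (x :: xs) ys = x :: rfsMerge xs ys := by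
  cases ys with
  | nil => cases xs <;> simp [rfsMerge]
  | cons y ys => simp [rfsMerge, h y (List.mem_cons_self ..)]

lemma rfsMerge_right (y : Int) (xs ys : List Int) (h : ∀ x ∈ xs, y < x) :
    rfsMerge xs (y :: ys) = y :: rfsMerge xs ys := by
  cases xs with
  | nil => simp [rfsMerge]
  | cons x xs =>
    have hx := h x (List.mem_cons_self ..)
    simp only [rfsMerge]
    rw [if_neg (by omega)]

lemma rfsLoopA_eq (ss fss : List Int) : ∀ (isf : List Bool) (i k ui fi : Nat),
    rfsLoopA ss fss isf i ((i : Int) - (k : Int)) ui fi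
      = rfsMerge (rfsGreedyF fss (rfsFrozenPos isf i) fi)
                 (rfsGreedyU ss (rfsUnfrozenPos isf i) k ui) := by
  intro isf
  induction isf with
  | nil => intro i k ui fi; simp [rfsLoopA, rfsFrozenPos, rfsUnfrozenPos, rfsGreedyF, rfsGreedyU, rfsMerge]
  | cons f rest ih =>
    intro i k ui fi
    simp only [rfsLoopA, rfsFrozenPos, rfsUnfrozenPos]
    cases f with
    | true =>
      simp only [if_true, rfsGreedyF]
      by_cases hc : (fi < fss.length && fss.getD fi 0 == (i : Int)) = true
      · rw [if_pos hc, if_pos hc]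
        have hstate : (i : Int) - (k : Int) + 1 = ((i+1 : Nat) : Int) - (k : Int) := by push_cast; ring
        rw [hstate, ih (i+1) k ui (fi+1)]
        rw [rfsMerge_left]
        intro y hy
        obtain ⟨p, hp, hx⟩ := rfsGreedyU_mem ss _ k ui y hy
        have := rfsUnfrozenPos_lb rest (i+1) p hp
        subst hx; exact_mod_cast by omega
      · rw [if_neg hc, if_neg hc]
        have hstate : (i : Int) - (k : Int) + 1 = ((i+1 : Nat) : Int) - (k : Int) := by push_cast; ring
        rw [hstate, ih (i+1) k ui fi]
    | false =>
      simp only [Bool.false_eq_true, if_false, rfsGreedyU]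
      have hcond : (ui < ss.length && ss.getD ui 0 + ((i : Int) - (k : Int)) == (i : Int))
                 = (ui < ss.length && ss.getD ui 0 == (k : Int)) := by
        by_cases hl : ui < ss.length
        · simp only [hl, decide_true, Bool.true_and]
          apply Bool.eq_iff_iff.mpr
          simp only [beq_iff_eq]
          omega
        · simp [hl]
      rw [hcond]
      by_cases hc : (ui < ss.length && ss.getD ui 0 == (k : Int)) = true
      · rw [if_pos hc, if_pos hc]
        have hstate : (i : Int) - (k : Int) = ((i+1 : Nat) : Int) - ((k+1 : Nat) : Int) := by push_cast; ring
        rw [hstate, ih (i+1) (k+1) (ui+1) fi]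
        rw [rfsMerge_right]
        intro x hx
        obtain ⟨p, hp, hxx⟩ := rfsGreedyF_mem fss _ fi x hx
        have := rfsFrozenPos_lb rest (i+1) p hp
        subst hxx; exact_mod_cast by omega
      · rw [if_neg hc, if_neg hc]
        have hstate : (i : Int) - (k : Int) = ((i+1 : Nat) : Int) - ((k+1 : Nat) : Int) := by push_cast; ring
        rw [hstate, ih (i+1) (k+1) ui fi]

-- ===== VERDICT (by name: the statement is the Claim_ definition above) =====
theorem reinsert_frozen_segments_spec : Claim_equal_reinsert_frozen_segments := by
  intro ss fss isf _
  unfold Spec_reinsert_frozen_segments reinsert_frozen_segments reinsert_frozen_segments_alt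
  have h := rfsLoopA_eq ss fss isf 0 0 0 0
  simpa using h
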